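-- pv_equiv track=rewrite | github.com/xiafelex/ai-memory-vault | src/ai_memory/storage.py | normalize_markdown_body
-- ===== SOURCE A (Python) =====
-- def normalize_markdown_body(text: str) -> str:
--     if not text:
--         return ""
--     lines = text.splitlines()
--     if lines and lines[0].startswith("# "):
--         lines = lines[1:]
--         while lines and not lines[0].strip():
--             lines = lines[1:]
--     return "\n".join(lines).strip()
-- ===== SOURCE B (Python) =====
-- def normalize_markdown_body(text: str) -> str:
--     s = text.replace("\r\n", "\n").replace("\r", "\n")
--     if s.startswith("# "):
--         i = s.find("\n")
--         s = "" if i == -1 else s[i + 1:]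
--     return s.strip()
-- ===== Notes on version B (the rewrite author's own statement) =====
-- stated objective: alternative
-- what changed: B never builds a list of lines: it normalizes line endings on the raw string with replace(), cuts a leading hash-space H1 header by slicing at the first newline found, and strips; A splits into a line list, drops the header line and following blank lines in a loop, and rejoins.
import Mathlib
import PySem

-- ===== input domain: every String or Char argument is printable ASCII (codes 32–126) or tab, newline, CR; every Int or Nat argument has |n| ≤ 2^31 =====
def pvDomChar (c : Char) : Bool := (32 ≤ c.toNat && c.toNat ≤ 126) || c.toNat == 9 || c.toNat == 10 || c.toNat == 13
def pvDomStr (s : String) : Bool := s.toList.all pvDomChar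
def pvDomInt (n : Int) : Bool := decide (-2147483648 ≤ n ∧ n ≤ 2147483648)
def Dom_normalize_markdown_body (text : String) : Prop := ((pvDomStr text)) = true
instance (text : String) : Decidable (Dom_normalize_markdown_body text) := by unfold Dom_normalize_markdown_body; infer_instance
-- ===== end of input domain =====

-- B never builds a list of lines: it normalizes line endings on the raw string with
-- replace(), cuts a leading hash-space H1 header by slicing at the first newline,
-- and strips (objective: alternative algorithm, same cost).

-- ===== PORT A =====
-- the 'while lines and not lines[0].strip(): lines = lines[1:]' loop of A
def pvSkipBlank : List String → List String
  | [] => []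
  | l :: rest => if PySem.Str.strip l == "" then pvSkipBlank rest else l :: rest

-- 'if lines and lines[0].startswith("# "): lines = lines[1:]; while …' (the while is pvSkipBlank)
def pvHeadA : List String → List String
  | [] => []
  | l0 :: rest => if PySem.Str.startswith l0 "# " then pvSkipBlank rest else l0 :: rest

def normalize_markdown_body (text : String) : String :=
  if text == "" then ""
  else PySem.Str.strip (PySem.Str.join "\n" (pvHeadA (PySem.Str.splitlines text)))

-- ===== PORT B =====
-- s = text.replace("\r\n", "\n").replace("\r", "\n"); if s.startswith("# "):
--   i = s.find("\n"); s = "" if i == -1 else s[i+1:]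
-- return s.strip()
def normalize_markdown_body_alt (text : String) : String :=
  let s := PySem.Str.replace (PySem.Str.replace text "\r\n" "\n") "\r" "\n"
  let s2 :=
    if PySem.Str.startswith s "# " then
      let i := PySem.Str.find s "\n"
      if i == -1 then "" else PySem.Str.slice s (some (i + 1)) none
    else s
  PySem.Str.strip s2

-- ===== PRECONDITION & SPEC =====
def Spec_normalize_markdown_body (text : String) (out : String) : Prop := out = normalize_markdown_body_alt text
instance (text : String) (out : String) : Decidable (Spec_normalize_markdown_body text out) := by unfold Spec_normalize_markdown_body; infer_instance

-- ===== CLAIM (what is proved, stated in full; the proofs are below) =====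
def Claim_equal_normalize_markdown_body : Prop := ∀ (text : String), Dom_normalize_markdown_body text → Spec_normalize_markdown_body text (normalize_markdown_body text)

-- ===== LEMMAS AND PROOFS =====
def pvRep1 : List Char → List Char
  | '\r' :: '\n' :: r => '\n' :: pvRep1 r
  | c :: r => c :: pvRep1 r
  | [] => []
def pvRep2 : List Char → List Char
  | '\r' :: r => '\n' :: pvRep2 r
  | c :: r => c :: pvRep2 r
  | [] => []
def pvNorm : List Char → List Char
  | '\r' :: '\n' :: r => '\n' :: pvNorm r
  | '\r' :: r => '\n' :: pvNorm r
  | c :: r => c :: pvNorm r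
  | [] => []

theorem pvRep1_go (fuel : Nat) : ∀ (l acc : List Char), l.length ≤ fuel →
    PySem.Chars.replace.go ['\r','\n'] ['\n'] fuel l acc = acc.reverse ++ pvRep1 l := by
  induction fuel with
  | zero =>
    intro l acc h
    rw [PySem.Chars.replace.go.eq_def]
    cases l with
    | nil => simp [pvRep1]
    | cons c t => simp at h
  | succ f ih =>
    intro l acc h
    rw [PySem.Chars.replace.go.eq_def]
    cases l with
    | nil => simp [pvRep1]
    | cons c t =>
      by_cases hp : List.isPrefixOf ['\r','\n'] (c :: t) = true
      · simp only [hp, if_true]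
        rw [List.isPrefixOf_iff_prefix] at hp
        rw [List.cons_prefix_cons] at hp
        obtain ⟨hc, hp2⟩ := hp
        cases t with
        | nil => simp at hp2
        | cons d u =>
          rw [List.cons_prefix_cons] at hp2
          obtain ⟨hd, -⟩ := hp2
          subst hc; subst hd
          rw [show (List.drop (['\r','\n'].length) ('\r'::'\n'::u)) = u from rfl,
              show ['\n'].reverse ++ acc = '\n' :: acc from rfl,
              ih u ('\n' :: acc) (by simp at h ⊢; omega)]
          simp [pvRep1]
      · simp only [hp]
        rw [ih t (c :: acc) (by simp at h ⊢; omega)]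
        have hr : pvRep1 (c :: t) = c :: pvRep1 t := by
          rw [pvRep1.eq_def]
          split
          · rename_i heq
            exfalso
            rename_i r'
            exact hp (heq ▸ List.isPrefixOf_iff_prefix.mpr ⟨r', rfl⟩)
          · rename_i c' r' heq
            injection heq with h1 h2
            rw [h1, h2]
          · rename_i heq; exact absurd heq (by simp)
        simp [hr]

theorem pvRep2_go (fuel : Nat) : ∀ (l acc : List Char), l.length ≤ fuel →
    PySem.Chars.replace.go ['\r'] ['\n'] fuel l acc = acc.reverse ++ pvRep2 l := by
  induction fuel with
  | zero =>
    intro l acc h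
    rw [PySem.Chars.replace.go.eq_def]
    cases l with
    | nil => simp [pvRep2]
    | cons c t => simp at h
  | succ f ih =>
    intro l acc h
    rw [PySem.Chars.replace.go.eq_def]
    cases l with
    | nil => simp [pvRep2]
    | cons c t =>
      by_cases hp : List.isPrefixOf ['\r'] (c :: t) = true
      · simp only [hp, if_true]
        rw [List.isPrefixOf_iff_prefix, List.cons_prefix_cons] at hp
        obtain ⟨hc, -⟩ := hp
        subst hc
        rw [show (List.drop (['\r'].length) ('\r'::t)) = t from rfl,
            show ['\n'].reverse ++ acc = '\n' :: acc from rfl,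
            ih t ('\n' :: acc) (by simp at h ⊢; omega)]
        simp [pvRep2]
      · simp only [hp]
        rw [ih t (c :: acc) (by simp at h ⊢; omega)]
        have hc : c ≠ '\r' := by
          intro hc; subst hc
          exact hp (List.isPrefixOf_iff_prefix.mpr ⟨t, rfl⟩)
        have hr : pvRep2 (c :: t) = c :: pvRep2 t := by
          rw [pvRep2.eq_def]
          split
          · rename_i heq
            injection heq with h1 _
            exact absurd h1 hc
          · rename_i c' r' heq
            injection heq with h1 h2
            rw [h1, h2]
          · rename_i heq; exact absurd heq (by simp)
        simp [hr]

theorem pvReplace_eq_rep1 (s : List Char) : PySem.Chars.replace s ['\r','\n'] ['\n'] = pvRep1 s := by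
  rw [PySem.Chars.replace]
  simp only [List.isEmpty_cons, Bool.false_eq_true, if_false]
  simpa using pvRep1_go s.length s [] le_rfl

theorem pvReplace_eq_rep2 (s : List Char) : PySem.Chars.replace s ['\r'] ['\n'] = pvRep2 s := by
  rw [PySem.Chars.replace]
  simp only [List.isEmpty_cons, Bool.false_eq_true, if_false]
  simpa using pvRep2_go s.length s [] le_rfl

theorem pvRep2_rep1 (t : List Char) : pvRep2 (pvRep1 t) = pvNorm t := by
  induction t using pvNorm.induct with
  | case1 r ih => simp [pvRep1, pvRep2, pvNorm, ih]
  | case2 r h ih =>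
    have h1 : pvRep1 ('\r' :: r) = '\r' :: pvRep1 r := by
      rw [pvRep1.eq_def]
      split
      · rename_i r' heq
        injection heq with _ h2
        exact absurd h2 (h r')
      · rename_i c' r' heq
        injection heq with e1 e2
        rw [e1, e2]
      · rename_i heq; exact absurd heq (by simp)
    have h2 : pvNorm ('\r' :: r) = '\n' :: pvNorm r := by
      rw [pvNorm.eq_def]
      split
      · rename_i r' heq
        injection heq with _ e2
        exact absurd e2 (h r')
      · rename_i r' heq
        injection heq with _ e2
        rw [e2]
      · rename_i hA hB heq
        injection heq with e1 _
        exact absurd e1.symm hB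
      · rename_i heq; exact absurd heq (by simp)
    rw [h1, h2, ← ih]
    simp [pvRep2]
  | case3 c r h1 h2 ih =>
    have hcr : c ≠ '\r' := fun hc => h2 hc
    have e1 : pvRep1 (c :: r) = c :: pvRep1 r := by
      rw [pvRep1.eq_def]
      split
      · rename_i r' heq
        injection heq with a1 _
        exact absurd a1 hcr
      · rename_i c' r' heq
        injection heq with a1 a2
        rw [a1, a2]
      · rename_i heq; exact absurd heq (by simp)
    have e2 : pvRep2 (c :: pvRep1 r) = c :: pvRep2 (pvRep1 r) := by
      rw [pvRep2.eq_def]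
      split
      · rename_i r' heq
        injection heq with a1 _
        exact absurd a1 hcr
      · rename_i c' r' heq
        injection heq with a1 a2
        rw [a1, a2]
      · rename_i heq; exact absurd heq (by simp)
    have e3 : pvNorm (c :: r) = c :: pvNorm r := by
      rw [pvNorm.eq_def]
      split
      · rename_i r' heq
        injection heq with a1 _
        exact absurd a1 hcr
      · rename_i r' heq
        injection heq with a1 _
        exact absurd a1 hcr
      · rename_i c' r' heq
        injection heq with a1 a2
        rw [a1, a2]
      · rename_i heq; exact absurd heq (by simp)
    rw [e1, e2, e3, ih]
  | case4 => rfl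

def pvConsHead (c : Char) : List (List Char) → List (List Char)
  | [] => [[c]]
  | h :: t => (c :: h) :: t

def pvLines : List Char → List (List Char)
  | [] => []
  | '\n' :: r => [] :: pvLines r
  | c :: r => pvConsHead c (pvLines r)

def pvMerge (cur : List Char) : List (List Char) → List (List Char)
  | [] => if cur.isEmpty then [] else [cur.reverse]
  | h :: t => (cur.reverse ++ h) :: t

def pvIsB : Char → Bool := fun c =>
  have n := c.toNat
  decide (n = 10) || decide (n = 13) || decide (n = 11) || decide (n = 12) || decide (n = 28) ||
    decide (n = 29) || decide (n = 30) || decide (n = 133) || decide (n = 8232) || decide (n = 8233)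


theorem pvCharEq (c d : Char) (h : c.toNat = d.toNat) : c = d :=
  Char.ext (UInt32.toNat_inj.mp h)

theorem pvNorm_ne_nil (t : List Char) (h : t ≠ []) : pvNorm t ≠ [] := by
  rw [pvNorm.eq_def]
  split <;> simp_all

theorem pvIsB_dom (c : Char) (h : pvDomChar c = true) :
    pvIsB c = (c == '\n' || c == '\r') := by
  by_cases h10 : c.toNat = 10
  · rw [pvCharEq c '\n' h10]; rfl
  · by_cases h13 : c.toNat = 13
    · rw [pvCharEq c '\r' h13]; rfl
    · have hne : (c == '\n' || c == '\r') = false := by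
        simp only [Bool.or_eq_false_iff, beq_eq_false_iff_ne, ne_eq]
        constructor
        · intro hc; exact h10 (by rw [hc]; rfl)
        · intro hc; exact h13 (by rw [hc]; rfl)
      rw [hne]
      simp only [pvDomChar, Bool.or_eq_true, Bool.and_eq_true, decide_eq_true_eq, beq_iff_eq] at h
      simp only [pvIsB, Bool.or_eq_false_iff, decide_eq_false_iff_not]
      omega

theorem pvMerge_nil (lr : List (List Char)) : pvMerge [] lr = lr := by
  cases lr <;> simp [pvMerge]

theorem pvMerge_consHead (c : Char) (cur : List Char) (lr : List (List Char)) :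
    pvMerge (c :: cur) lr = pvMerge cur (pvConsHead c lr) := by
  cases lr <;> simp [pvMerge, pvConsHead]


theorem pvNorm_cr (r : List Char) (h : ∀ x, r = '\n' :: x → False) :
    pvNorm ('\r' :: r) = '\n' :: pvNorm r := by
  rw [pvNorm.eq_def]
  split
  · rename_i r' heq
    injection heq with _ e2
    exact absurd e2 (fun e => h r' e)
  · rename_i r' heq
    injection heq with _ e2
    rw [e2]
  · rename_i hA hB heq
    injection heq with e1 _
    exact absurd e1.symm hB
  · rename_i heq; exact absurd heq (by simp)

theorem pvNorm_cons (c : Char) (r : List Char) (hcr : c ≠ '\r') :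
    pvNorm (c :: r) = c :: pvNorm r := by
  rw [pvNorm.eq_def]
  split
  · rename_i r' heq
    injection heq with a1 _
    exact absurd a1 hcr
  · rename_i r' heq
    injection heq with a1 _
    exact absurd a1 hcr
  · rename_i c' r' heq
    injection heq with a1 a2
    rw [a1, a2]
  · rename_i heq; exact absurd heq (by simp)

theorem pvLines_cons (c : Char) (r : List Char) (h : c ≠ '\n') :
    pvLines (c :: r) = pvConsHead c (pvLines r) := by
  rw [pvLines.eq_def]
  split
  · rename_i heq; exact absurd heq (by simp)
  · rename_i r' heq
    injection heq with a1 _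
    exact absurd a1 h
  · rename_i c' r' heq
    injection heq with a1 a2
    rw [a1, a2]



theorem pvSplitlinesGo_lem : ∀ (t : List Char), (∀ c ∈ t, pvDomChar c = true) →
    ∀ (cur : List Char) (acc : List (List Char)),
      PySem.Chars.splitlines.go pvIsB t cur acc = acc.reverse ++ pvMerge cur (pvLines (pvNorm t)) := by
  intro t
  induction t using pvNorm.induct with
  | case1 r ih =>
    intro hdom cur acc
    have hd' : ∀ c ∈ r, pvDomChar c = true := fun c hc => hdom c (by simp [hc])
    rw [PySem.Chars.splitlines.go.eq_def]
    split
    · rename_i heq; exact absurd heq (by simp)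
    · rename_i cur' acc' a1 a2 a3 rest' heq
      injection heq with _ e2
      injection e2 with _ e3
      subst e3
      rw [ih hd' [] (cur'.reverse :: acc'), pvMerge_nil]
      simp [pvNorm, pvLines, pvMerge]
    · rename_i cchar rest' hno heq
      injection heq with e1 e2
      exact (hno r e1.symm e2.symm).elim
  | case2 r h ih =>
    intro hdom cur acc
    have hd' : ∀ c ∈ r, pvDomChar c = true := fun c hc => hdom c (by simp [hc])
    rw [PySem.Chars.splitlines.go.eq_def]
    split
    · rename_i heq; exact absurd heq (by simp)
    · rename_i rest' heq
      injection heq with _ e2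
      exact (h rest' e2).elim
    · rename_i cchar rest' hno heq
      injection heq with e1 e2
      subst e1
      subst e2
      rw [if_pos (by decide : pvIsB '\r' = true)]
      rw [ih hd' [] (_ :: _), pvMerge_nil, pvNorm_cr r h]
      simp [pvLines, pvMerge]
  | case3 c r h1 h2 ih =>
    intro hdom cur acc
    have hd' : ∀ x ∈ r, pvDomChar x = true := fun x hc => hdom x (by simp [hc])
    have hcr : c ≠ '\r' := fun hc => h2 hc
    rw [PySem.Chars.splitlines.go.eq_def]
    split
    · rename_i heq; exact absurd heq (by simp)
    · rename_i rest' heq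
      injection heq with e1 _
      exact absurd e1 hcr
    · rename_i cchar rest' hno heq
      injection heq with e1 e2
      subst e1
      subst e2
      rw [pvIsB_dom c (hdom c (by simp))]
      by_cases hcn : c = '\n'
      · subst hcn
        rw [if_pos (by decide)]
        rw [ih hd' [] (_ :: _), pvMerge_nil, pvNorm_cons _ _ hcr]
        simp [pvLines, pvMerge]
      · have hb : (c == '\n' || c == '\r') = false := by simp [hcn, hcr]
        rw [hb, if_neg (by simp)]
        rw [ih hd' (c :: _) _, pvNorm_cons _ _ hcr, pvLines_cons _ _ hcn, pvMerge_consHead]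
  | case4 =>
    intro _ cur acc
    rw [PySem.Chars.splitlines.go.eq_def]
    by_cases hc : cur.isEmpty <;> simp [pvNorm, pvLines, pvMerge, hc]

theorem pvSplitlines_eq (t : List Char) (h : ∀ c ∈ t, pvDomChar c = true) :
    PySem.Chars.splitlines t = pvLines (pvNorm t) := by
  rw [show PySem.Chars.splitlines t = PySem.Chars.splitlines.go pvIsB t [] [] from rfl]
  rw [pvSplitlinesGo_lem t h [] [], pvMerge_nil]
  rfl

theorem pvConsHead_ne_nil (c : Char) (lr : List (List Char)) : pvConsHead c lr ≠ [] := by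
  cases lr <;> simp [pvConsHead]

theorem pvLines_ne_nil (s : List Char) (h : s ≠ []) : pvLines s ≠ [] := by
  rw [pvLines.eq_def]
  split
  · simp_all
  · simp
  · exact pvConsHead_ne_nil _ _

theorem pvLines_append (a : List Char) : ∀ (b : List Char), '\n' ∉ a →
    pvLines (a ++ '\n' :: b) = a :: pvLines b := by
  induction a with
  | nil => intro b _; simp [pvLines]
  | cons c a ih =>
    intro b ha
    have hc : c ≠ '\n' := fun h => ha (h ▸ List.mem_cons_self ..)
    rw [List.cons_append, pvLines_cons _ _ hc, ih b (fun h => ha (List.mem_cons_of_mem _ h))]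
    simp [pvConsHead]

theorem pvLines_no_nl (s : List Char) (h : '\n' ∉ s) (hs : s ≠ []) : pvLines s = [s] := by
  induction s with
  | nil => simp at hs
  | cons c r ih =>
    have hc : c ≠ '\n' := fun e => h (e ▸ List.mem_cons_self ..)
    rw [pvLines_cons _ _ hc]
    cases r with
    | nil => rfl
    | cons d u =>
      rw [ih (fun e => h (List.mem_cons_of_mem _ e)) (by simp)]
      rfl

theorem pvStrip_append_nl (x : List Char) :
    PySem.Chars.strip (x ++ ['\n']) = PySem.Chars.strip x := by
  simp only [PySem.Chars.strip, PySem.Chars.lstrip]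
  rw [List.dropWhile_append]
  by_cases he : (List.dropWhile PySem.Chars.isspace x).isEmpty
  · rw [if_pos he]
    rw [List.isEmpty_iff.mp he]
    rfl
  · rw [if_neg he]
    simp only [PySem.Chars.rstrip, List.reverse_append]
    rw [show (['\n'] : List Char).reverse = ['\n'] from rfl]
    rw [show (['\n'] ++ (List.dropWhile PySem.Chars.isspace x).reverse) = '\n' :: (List.dropWhile PySem.Chars.isspace x).reverse from rfl]
    rw [List.dropWhile_cons, if_pos (by decide : PySem.Chars.isspace '\n' = true)]

theorem pvLines_nil_iff (s : List Char) : pvLines s = [] ↔ s = [] := by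
  constructor
  · intro h
    by_contra hs
    exact pvLines_ne_nil s hs h
  · intro h; subst h; rfl

theorem pvJoin_lines (s : List Char) :
    PySem.Chars.join ['\n'] (pvLines s) = s ∨ s = PySem.Chars.join ['\n'] (pvLines s) ++ ['\n'] := by
  induction s with
  | nil => left; rfl
  | cons c r ih =>
    by_cases hc : c = '\n'
    · subst hc
      rw [show pvLines ('\n' :: r) = [] :: pvLines r from by simp [pvLines]]
      cases hl : pvLines r with
      | nil =>
        right
        rw [(pvLines_nil_iff r).mp hl]
        rfl
      | cons q qs =>
        rw [show PySem.Chars.join ['\n'] ([] :: q :: qs) = '\n' :: PySem.Chars.join ['\n'] (q :: qs) from by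
          simp [PySem.Chars.join, List.intercalate, List.intersperse]]
        rw [hl] at ih
        rcases ih with h | h
        · left; rw [h]
        · right; rw [List.cons_append]; rw [← h]
    · rw [pvLines_cons _ _ hc]
      cases hl : pvLines r with
      | nil =>
        rw [(pvLines_nil_iff r).mp hl]
        left; rfl
      | cons q qs =>
        rw [show pvConsHead c (q :: qs) = (c :: q) :: qs from rfl]
        rw [hl] at ih
        have hj : PySem.Chars.join ['\n'] ((c :: q) :: qs) = c :: PySem.Chars.join ['\n'] (q :: qs) := by
          cases qs <;> simp [PySem.Chars.join, List.intercalate, List.intersperse]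
        rw [hj]
        rcases ih with h | h
        · left; rw [h]
        · right; rw [List.cons_append, ← h]

theorem pvStrip_join_lines (s : List Char) :
    PySem.Chars.strip (PySem.Chars.join ['\n'] (pvLines s)) = PySem.Chars.strip s := by
  rcases pvJoin_lines s with h | h
  · rw [h]
  · conv_rhs => rw [h]
    rw [pvStrip_append_nl]

theorem pvPrefix_append_nl (p : List Char) : ∀ (a b : List Char), '\n' ∉ p → '\n' ∉ a →
    (p <+: a ++ '\n' :: b ↔ p <+: a) := by
  induction p with
  | nil => intro a b _ _; simp
  | cons x p ih =>
    intro a b hp ha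
    cases a with
    | nil =>
      simp only [List.nil_append, List.cons_prefix_cons]
      constructor
      · rintro ⟨hx, -⟩
        exact absurd hx.symm (fun e => hp (e ▸ List.mem_cons_self ..))
      · intro h; exact absurd h (by simp)
    | cons y a =>
      simp only [List.cons_append, List.cons_prefix_cons]
      rw [ih a b (fun e => hp (List.mem_cons_of_mem _ e)) (fun e => ha (List.mem_cons_of_mem _ e))]

theorem pvSingPrefix_drop (s : List Char) (x : Char) (j : Nat) (hj : j < s.length) :
    [x] <+: List.drop j s ↔ s[j] = x := by
  rw [List.drop_eq_getElem_cons hj]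
  simp only [List.cons_prefix_cons, List.nil_prefix, and_true]
  exact eq_comm

theorem pvFindDecomp (n : List Char) (hin : '\n' ∈ n) :
    0 ≤ PySem.Chars.find n ['\n'] ∧
    '\n' ∉ n.take (PySem.Chars.find n ['\n']).toNat ∧
    n = n.take (PySem.Chars.find n ['\n']).toNat ++ '\n' :: n.drop ((PySem.Chars.find n ['\n']).toNat + 1) := by
  have hf : 0 ≤ PySem.Chars.find n ['\n'] :=
    (PySem.Chars.find_nonneg_iff n ['\n']).mpr ((List.singleton_infix_iff '\n' n).mpr hin)
  obtain ⟨hpre, hmin⟩ := PySem.Chars.find_spec hf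
  set k := (PySem.Chars.find n ['\n']).toNat with hk
  have hklt : k < n.length := by
    by_contra hge
    rw [List.drop_eq_nil_of_le (by omega)] at hpre
    exact absurd hpre (by simp)
  have hget : n[k] = '\n' := (pvSingPrefix_drop n '\n' k hklt).mp hpre
  refine ⟨hf, ?_, ?_⟩
  · intro hmem
    obtain ⟨j, hj, hje⟩ := List.getElem_of_mem hmem
    have hjk : j < k := by
      have := List.length_take_le k n
      have : j < k := by
        have := hj
        simp [List.length_take] at this
        omega
      exact this
    have hje' : n[j]'(by omega) = '\n' := by
      rw [List.getElem_take] at hje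
      exact hje
    exact hmin j hjk ((pvSingPrefix_drop n '\n' j (by omega)).mpr hje')
  · conv_lhs => rw [← List.take_append_drop k n]
    congr 1
    rw [List.drop_eq_getElem_cons hklt, hget]

-- ----- A-side lemmas (blank-line skipping is absorbed by the final strip) -----

theorem pvLstrip_append_space (p s : List Char) (h : ∀ c ∈ p, PySem.Chars.isspace c = true) :
    PySem.Chars.lstrip (p ++ s) = PySem.Chars.lstrip s := by
  induction p with
  | nil => rfl
  | cons c p ih =>
    simp only [List.cons_append, PySem.Chars.lstrip, List.dropWhile_cons,
      h c (List.mem_cons_self ..)]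
    exact ih (fun c hc => h c (List.mem_cons_of_mem _ hc))

theorem pvStrip_append_space (p s : List Char) (h : ∀ c ∈ p, PySem.Chars.isspace c = true) :
    PySem.Chars.strip (p ++ s) = PySem.Chars.strip s := by
  simp only [PySem.Chars.strip, pvLstrip_append_space p s h]

theorem pvAll_space_of_strip_nil (l : List Char) (h : PySem.Chars.strip l = []) :
    ∀ c ∈ l, PySem.Chars.isspace c = true := by
  simp only [PySem.Chars.strip, PySem.Chars.rstrip, PySem.Chars.lstrip,
    List.reverse_eq_nil_iff, List.dropWhile_eq_nil_iff, List.mem_reverse] at h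
  intro c hc
  rcases (List.takeWhile_append_dropWhile (p := PySem.Chars.isspace) (l := l)) ▸ hc |> List.mem_append.mp with h1 | h1
  · exact List.mem_takeWhile_imp h1
  · exact h c h1

theorem pvStrip_join_skip (ls : List (List Char)) :
    PySem.Chars.strip (PySem.Chars.join ['\n'] ls) =
      PySem.Chars.strip (PySem.Chars.join ['\n']
        (ls.dropWhile (fun l => PySem.Chars.strip l = []))) := by
  induction ls with
  | nil => rfl
  | cons l rest ih =>
    by_cases hb : PySem.Chars.strip l = []
    · rw [List.dropWhile_cons_of_pos (by simpa using hb)]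
      have hsp : ∀ c ∈ l ++ ['\n'], PySem.Chars.isspace c = true := by
        intro c hc
        rcases List.mem_append.mp hc with h1 | h1
        · exact pvAll_space_of_strip_nil l hb c h1
        · simp at h1; subst h1; decide
      cases rest with
      | nil =>
        simpa [PySem.Chars.join, List.intercalate] using hb
      | cons r rs =>
        have hjoin : PySem.Chars.join ['\n'] (l :: r :: rs)
            = (l ++ ['\n']) ++ PySem.Chars.join ['\n'] (r :: rs) := by
          simp [PySem.Chars.join, List.intercalate, List.intersperse, List.flatten]
        rw [hjoin, pvStrip_append_space _ _ hsp]
        exact ih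
    · rw [List.dropWhile_cons_of_neg (by simpa using hb)]

theorem pvSkipBlank_map (ls : List String) :
    (pvSkipBlank ls).map String.toList
      = (ls.map String.toList).dropWhile (fun l => PySem.Chars.strip l = []) := by
  induction ls with
  | nil => rfl
  | cons l rest ih =>
    by_cases hb : PySem.Chars.strip l.toList = []
    · have hb' : PySem.Str.strip l == "" := by
        simp [PySem.Str.strip, hb]
      simp only [pvSkipBlank, hb', if_true, List.map_cons]
      rw [List.dropWhile_cons_of_pos (by simpa using hb)]
      exact ih
    · have hb' : (PySem.Str.strip l == "") = false := by
        simp only [PySem.Str.strip, beq_eq_false_iff_ne, ne_eq]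
        intro h
        exact hb (by simpa using congrArg String.toList h)
      simp only [pvSkipBlank, hb', Bool.false_eq_true, if_false, List.map_cons]
      rw [List.dropWhile_cons_of_neg (by simpa using hb)]

theorem pvStrip_join_skipBlank (ls : List String) :
    PySem.Str.strip (PySem.Str.join "\n" (pvSkipBlank ls))
      = PySem.Str.strip (PySem.Str.join "\n" ls) := by
  apply String.toList_inj.mp
  simp only [PySem.Str.toList_strip, PySem.Str.toList_join, pvSkipBlank_map]
  have hnl : "\n".toList = ['\n'] := rfl
  rw [hnl, ← pvStrip_join_skip]


-- ===== main equivalence proof =====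

theorem pvStartswith_take (n : List Char) (hin : '\n' ∈ n) :
    PySem.Chars.startswith (n.take (PySem.Chars.find n ['\n']).toNat) ['#',' ']
      = PySem.Chars.startswith n ['#',' '] := by
  obtain ⟨hf, hfree, hdec⟩ := pvFindDecomp n hin
  rw [Bool.eq_iff_iff, PySem.Chars.startswith_iff, PySem.Chars.startswith_iff]
  conv_rhs => rw [hdec]
  exact (pvPrefix_append_nl ['#',' '] _ _ (by decide) hfree).symm

theorem pvMain (text : String) (hdom : Dom_normalize_markdown_body text) :
    normalize_markdown_body text = normalize_markdown_body_alt text := by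
  have hdc : ∀ c ∈ text.toList, pvDomChar c = true := by
    simpa [Dom_normalize_markdown_body, pvDomStr, List.all_eq_true] using hdom
  by_cases h0 : text = ""
  · subst h0; rfl
  · have h0' : (text == "") = false := by simpa using h0
    simp only [normalize_markdown_body, normalize_markdown_body_alt, h0', Bool.false_eq_true,
      if_false]
    have ht : text.toList ≠ [] := by
      intro h
      exact h0 (String.toList_inj.mp (by rw [h]; rfl))
    set t := text.toList with htdef
    set n := pvNorm t with hndef
    have hnn : n ≠ [] := pvNorm_ne_nil t ht
    have hs : (PySem.Str.replace (PySem.Str.replace text "\r\n" "\n") "\r" "\n").toList = n := by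
      rw [PySem.Str.toList_replace, PySem.Str.toList_replace,
          show ("\r\n" : String).toList = ['\r','\n'] from rfl,
          show ("\r" : String).toList = ['\r'] from rfl,
          show ("\n" : String).toList = ['\n'] from rfl,
          pvReplace_eq_rep1, pvReplace_eq_rep2, pvRep2_rep1]
    set s := PySem.Str.replace (PySem.Str.replace text "\r\n" "\n") "\r" "\n" with hsdef
    have hsl : (PySem.Str.splitlines text).map String.toList = pvLines n := by
      rw [PySem.Str.splitlines_map_toList, pvSplitlines_eq t hdc]
    have hswB : PySem.Str.startswith s "# " = PySem.Chars.startswith n ['#',' '] := by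
      rw [PySem.Str.startswith_eq, hs]; rfl
    have hfind : PySem.Str.find s "\n" = PySem.Chars.find n ['\n'] := by
      rw [PySem.Str.find_eq, hs]; rfl
    cases hL : PySem.Str.splitlines text with
    | nil =>
      exfalso
      rw [hL] at hsl
      exact pvLines_ne_nil n hnn hsl.symm
    | cons s0 rst =>
      rw [hL] at hsl
      simp only [List.map_cons] at hsl
      have hswA : PySem.Str.startswith s0 "# " = PySem.Chars.startswith n ['#',' '] := by
        rw [PySem.Str.startswith_eq, show ("# " : String).toList = ['#',' '] from rfl]
        by_cases hin : '\n' ∈ n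
        · obtain ⟨hf, hfree, hdec⟩ := pvFindDecomp n hin
          have hlines : pvLines n = n.take (PySem.Chars.find n ['\n']).toNat ::
              pvLines (n.drop ((PySem.Chars.find n ['\n']).toNat + 1)) := by
            conv_lhs => rw [hdec]
            exact pvLines_append _ _ hfree
          rw [hlines] at hsl
          have hs0 : s0.toList = n.take (PySem.Chars.find n ['\n']).toNat := by
            injection hsl
          rw [hs0, pvStartswith_take n hin]
        · have hlines : pvLines n = [n] := pvLines_no_nl n hin hnn
          rw [hlines] at hsl
          have hs0 : s0.toList = n := by injection hsl
          rw [hs0]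
      simp only [pvHeadA]
      by_cases hsw : PySem.Chars.startswith n ['#',' '] = true
      · rw [hswA, hswB, if_pos hsw, if_pos hsw, pvStrip_join_skipBlank]
        by_cases hin : '\n' ∈ n
        · obtain ⟨hf, hfree, hdec⟩ := pvFindDecomp n hin
          have hlines : pvLines n = n.take (PySem.Chars.find n ['\n']).toNat ::
              pvLines (n.drop ((PySem.Chars.find n ['\n']).toNat + 1)) := by
            conv_lhs => rw [hdec]
            exact pvLines_append _ _ hfree
          rw [hlines] at hsl
          have hrst : rst.map String.toList = pvLines (n.drop ((PySem.Chars.find n ['\n']).toNat + 1)) := by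
            injection hsl
          have hne : (PySem.Str.find s "\n" == -1) = false := by
            rw [hfind]
            simp only [beq_eq_false_iff_ne, ne_eq]
            omega
          rw [hne]
          simp only [Bool.false_eq_true, if_false]
          apply String.toList_inj.mp
          rw [PySem.Str.toList_strip, PySem.Str.toList_join, hrst,
              show ("\n" : String).toList = ['\n'] from rfl, pvStrip_join_lines,
              PySem.Str.toList_strip, PySem.Str.toList_slice, PySem.Chars.slice_eq_listSlice, hs,
              hfind, PySem.List.slice_from _ (by omega : (0:Int) ≤ PySem.Chars.find n ['\n'] + 1),
              show (PySem.Chars.find n ['\n'] + 1).toNat = (PySem.Chars.find n ['\n']).toNat + 1 from by omega]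
        · have hlines : pvLines n = [n] := pvLines_no_nl n hin hnn
          rw [hlines] at hsl
          have hrst : rst.map String.toList = [] := by injection hsl
          have hrst' : rst = [] := List.map_eq_nil_iff.mp hrst
          have hfe : PySem.Str.find s "\n" = -1 := by
            rw [hfind, PySem.Chars.find_eq_neg_one_iff]
            intro hinf
            exact hin ((List.singleton_infix_iff '\n' n).mp hinf)
          rw [hrst', hfe]
          rfl
      · have hsw' : PySem.Chars.startswith n ['#',' '] = false := by
          simpa using hsw
        rw [hswA, hswB, hsw']
        simp only [Bool.false_eq_true, if_false]
        apply String.toList_inj.mp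
        rw [PySem.Str.toList_strip, PySem.Str.toList_join,
            show ("\n" : String).toList = ['\n'] from rfl, List.map_cons, hsl,
            pvStrip_join_lines, PySem.Str.toList_strip, hs]

-- ===== VERDICT (by name: the statement is the Claim_ definition above) =====
theorem normalize_markdown_body_spec : Claim_equal_normalize_markdown_body := by
  intro text hdom
  unfold Spec_normalize_markdown_body
  exact pvMain text hdom
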